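-- pv_equiv track=rewrite | github.com/Venue6603/ANTAgent | AntAgent/autodev/diff_doctor.py | _require_add_and_remove_each_hunk
-- ===== SOURCE A (Python) =====
-- from typing import Tuple
--
-- def _require_add_and_remove_each_hunk(diff_text: str) -> Tuple[bool, str]:
--     """
--     Universal rule: every hunk must include at least one '+' and at least one '-'.
--     Prevents append-only or delete-only diffs that often fail to anchor.
--
--     EXCEPTION: Pure insertions are allowed if they have sufficient context lines
--     to anchor properly (at least 2 context lines).
--     """
--     lines = diff_text.splitlines()
--     in_hunk = False
--     plus = minus = False
--     context_count = 0
--     saw_any = False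
--     def flush() -> Tuple[bool, str]:
--         if not in_hunk:
--             return True, ""
--         # Allow pure insertions if they have sufficient context
--         if plus and not minus and context_count >= 2:
--             return True, ""
--         # Allow pure deletions if they have sufficient context
--         if minus and not plus and context_count >= 2:
--             return True, ""
--         # Require both + and - for hunks with insufficient context
--         if not plus or not minus:
--             return False, "Each hunk must contain at least one added ('+') and one removed ('-') line, unless it has sufficient context (2+ lines)."
--         return True, ""
--     for ln in lines:
--         if ln.startswith("@@"):
--             ok, why = flush()
--             if not ok: return ok, why
--             in_hunk = True; saw_any = True; plus = minus = False; context_count = 0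
--             continue
--         if not in_hunk: continue
--         if ln.startswith("+"): plus = True
--         elif ln.startswith("-"): minus = True
--         elif ln.startswith(" "): context_count += 1
--     ok, why = flush()
--     if not ok: return ok, why
--     if not saw_any: return False, "No @@ hunks found."
--     return True, ""
-- ===== SOURCE B (Python) =====
-- from typing import Tuple
--
-- _MSG = "Each hunk must contain at least one added ('+') and one removed ('-') line, unless it has sufficient context (2+ lines)."
--
-- def _require_add_and_remove_each_hunk(diff_text: str) -> Tuple[bool, str]:
--     # Pass 1: group lines into hunks (lines before the first '@@' are discarded).
--     hunks = []
--     cur = None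
--     for ln in diff_text.splitlines():
--         if ln.startswith("@@"):
--             if cur is not None:
--                 hunks.append(cur)
--             cur = []
--         elif cur is not None:
--             cur.append(ln)
--     if cur is not None:
--         hunks.append(cur)
--     if not hunks:
--         return False, "No @@ hunks found."
--     # Pass 2: validate each hunk, reporting the first failure.
--     for h in hunks:
--         plus = any(l.startswith("+") for l in h)
--         minus = any(l.startswith("-") for l in h)
--         context = sum(1 for l in h if l.startswith(" "))
--         if (plus != minus and context < 2) or (not plus and not minus):
--             return False, _MSG
--     return True, ""
-- ===== Notes on version B (the rewrite author's own statement) =====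
-- stated objective: alternative
-- what changed: Replaced A's single-pass streaming state machine (flush-at-each-hunk-boundary with mutable in_hunk/plus/minus/context flags) by a two-pass group-then-validate decomposition: first split the lines into a list of hunks, then check each hunk independently and report the first failure.
import Mathlib
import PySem

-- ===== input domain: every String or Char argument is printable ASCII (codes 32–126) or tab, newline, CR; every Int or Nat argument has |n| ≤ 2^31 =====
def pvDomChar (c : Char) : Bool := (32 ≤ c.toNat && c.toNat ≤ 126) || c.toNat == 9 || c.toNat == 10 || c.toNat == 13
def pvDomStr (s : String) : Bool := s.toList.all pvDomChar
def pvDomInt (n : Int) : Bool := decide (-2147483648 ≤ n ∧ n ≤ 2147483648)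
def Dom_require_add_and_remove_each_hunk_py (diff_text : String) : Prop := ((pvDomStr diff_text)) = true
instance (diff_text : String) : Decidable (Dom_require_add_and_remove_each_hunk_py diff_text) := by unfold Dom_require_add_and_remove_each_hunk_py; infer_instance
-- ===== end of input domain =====

-- B re-implements A as a two-pass group-then-validate (split lines into hunks, then check each);
-- same return value everywhere; objective: simpler decomposition, no speed claim.

def pvMsg : String := "Each hunk must contain at least one added ('+') and one removed ('-') line, unless it has sufficient context (2+ lines)."

-- ===== PORT A =====
-- flush(): reads the streaming state (in_hunk, plus, minus, context_count)
def pvFlushA (in_hunk plus minus : Bool) (context_count : Int) : Bool × String :=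
  if !in_hunk then (true, "")
  else if plus && !minus && context_count ≥ 2 then (true, "")
  else if minus && !plus && context_count ≥ 2 then (true, "")
  else if !plus || !minus then (false, pvMsg)
  else (true, "")

-- the for-loop; at nil, the trailing flush + saw_any check
def pvLoopA (lines : List String) (in_hunk plus minus : Bool) (context_count : Int)
    (saw_any : Bool) : Bool × String :=
  match lines with
  | [] =>
    let r := pvFlushA in_hunk plus minus context_count
    if !r.1 then r
    else if !saw_any then (false, "No @@ hunks found.")
    else (true, "")
  | ln :: rest =>
    if PySem.Str.startswith ln "@@" then
      let r := pvFlushA in_hunk plus minus context_count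
      if !r.1 then r
      else pvLoopA rest true false false 0 true
    else if !in_hunk then pvLoopA rest in_hunk plus minus context_count saw_any
    else if PySem.Str.startswith ln "+" then pvLoopA rest in_hunk true minus context_count saw_any
    else if PySem.Str.startswith ln "-" then pvLoopA rest in_hunk plus true context_count saw_any
    else if PySem.Str.startswith ln " " then pvLoopA rest in_hunk plus minus (context_count + 1) saw_any
    else pvLoopA rest in_hunk plus minus context_count saw_any

def require_add_and_remove_each_hunk_py (diff_text : String) : Bool × String :=
  pvLoopA (PySem.Str.splitlines diff_text) false false false 0 false

-- ===== PORT B =====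
-- pass 1: group lines into hunks; cur = the current hunk's lines, reversed (none before the first '@@')
def pvGroupB (lines : List String) (cur : Option (List String)) : List (List String) :=
  match lines, cur with
  | [], none => []
  | [], some c => [c.reverse]
  | ln :: rest, cur =>
    if PySem.Str.startswith ln "@@" then
      match cur with
      | none => pvGroupB rest (some [])
      | some c => c.reverse :: pvGroupB rest (some [])
    else
      match cur with
      | none => pvGroupB rest none
      | some c => pvGroupB rest (some (ln :: c))

-- the per-hunk acceptance test of Source B
def pvHunkBad (h : List String) : Bool :=
  let plus := h.any (fun l => PySem.Str.startswith l "+")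
  let minus := h.any (fun l => PySem.Str.startswith l "-")
  let context : Int := ((h.filter (fun l => PySem.Str.startswith l " ")).length : Int)
  (plus != minus && context < 2) || (!plus && !minus)

-- pass 2: first failing hunk wins
def pvValidateB (hunks : List (List String)) : Bool × String :=
  match hunks with
  | [] => (true, "")
  | h :: rest => if pvHunkBad h then (false, pvMsg) else pvValidateB rest

def require_add_and_remove_each_hunk_py_alt (diff_text : String) : Bool × String :=
  let hunks := pvGroupB (PySem.Str.splitlines diff_text) none
  if hunks.isEmpty then (false, "No @@ hunks found.")
  else pvValidateB hunks

-- ===== PRECONDITION & SPEC =====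
def Spec_require_add_and_remove_each_hunk_py (diff_text : String) (out : Bool × String) : Prop := out = require_add_and_remove_each_hunk_py_alt diff_text
instance (diff_text : String) (out : Bool × String) : Decidable (Spec_require_add_and_remove_each_hunk_py diff_text out) := by unfold Spec_require_add_and_remove_each_hunk_py; infer_instance

-- ===== CLAIM (what is proved, stated in full; the proofs are below) =====
def Claim_equal_require_add_and_remove_each_hunk_py : Prop := ∀ (diff_text : String), Dom_require_add_and_remove_each_hunk_py diff_text → Spec_require_add_and_remove_each_hunk_py diff_text (require_add_and_remove_each_hunk_py diff_text)

-- ===== LEMMAS AND PROOFS =====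

-- two distinct single-char prefixes cannot both hold
theorem pvExcl {l : List Char} {a b : Char} (hab : a ≠ b)
    (h : PySem.Chars.startswith l [a] = true) : PySem.Chars.startswith l [b] = false := by
  rw [PySem.Chars.startswith_iff] at h
  cases hx : PySem.Chars.startswith l [b]
  · rfl
  · exfalso
    rw [PySem.Chars.startswith_iff] at hx
    obtain ⟨t1, e1⟩ := h
    obtain ⟨t2, e2⟩ := hx
    rw [← e1] at e2
    injection e2 with hb _
    exact hab hb.symm

-- A's flush on an in-hunk state fails exactly when Source B's per-hunk rule rejects
theorem pvFlushA_eq (P M : Bool) (cc : Int) :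
    pvFlushA true P M cc =
      if ((P != M) && cc < 2) || (!P && !M) then (false, pvMsg) else (true, "") := by
  by_cases h : (2:Int) ≤ cc <;>
    cases P <;> cases M <;>
      simp [pvFlushA, h] <;> omega

-- pvHunkBad on the reversed current hunk, in terms of the streaming state
theorem pvHunkBad_reverse (c : List String) :
    pvHunkBad c.reverse =
      ((((c.any (fun l => PySem.Str.startswith l "+")) != (c.any (fun l => PySem.Str.startswith l "-")))
        && (((c.filter (fun l => PySem.Str.startswith l " ")).length : Int) < 2))
      || (!(c.any (fun l => PySem.Str.startswith l "+")) && !(c.any (fun l => PySem.Str.startswith l "-")))) := by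
  simp only [pvHunkBad]
  rw [List.any_reverse, List.any_reverse, List.filter_reverse, List.length_reverse]

-- flush on the streaming state of hunk c = Source B's check of that hunk
theorem pvFlushA_state (c : List String) :
    pvFlushA true (c.any (fun l => PySem.Str.startswith l "+"))
        (c.any (fun l => PySem.Str.startswith l "-"))
        ((c.filter (fun l => PySem.Str.startswith l " ")).length : Int)
      = if pvHunkBad c.reverse then (false, pvMsg) else (true, "") := by
  rw [pvHunkBad_reverse, pvFlushA_eq]

theorem pvGroupB_some_ne_nil (lines : List String) (c : List String) :
    pvGroupB lines (some c) ≠ [] := by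
  induction lines generalizing c with
  | nil => simp [pvGroupB]
  | cons ln rest ih =>
    simp only [pvGroupB]
    split
    · simp
    · exact ih _

-- main in-hunk invariant: A's streaming loop, its flags being those of the (reversed)
-- current hunk c, agrees with validating the remaining groups
theorem pvLoopA_inHunk (lines : List String) (c : List String) :
    pvLoopA lines true (c.any (fun l => PySem.Str.startswith l "+"))
        (c.any (fun l => PySem.Str.startswith l "-"))
        ((c.filter (fun l => PySem.Str.startswith l " ")).length : Int) true
      = pvValidateB (pvGroupB lines (some c)) := by
  induction lines generalizing c with
  | nil =>
    simp only [pvLoopA, pvGroupB, pvFlushA_state]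
    cases hB : pvHunkBad c.reverse <;> simp [hB, pvValidateB]
  | cons ln rest ih =>
    have h0 := ih []
    simp only [List.any_nil, List.filter_nil, List.length_nil, Nat.cast_zero] at h0
    cases h1 : PySem.Str.startswith ln "@@" with
    | true =>
      simp only [pvLoopA, pvGroupB, h1, if_true, pvFlushA_state]
      cases hB : pvHunkBad c.reverse <;> simp [hB, pvValidateB, h0]
    | false =>
      have h1' : PySem.Chars.startswith ln.toList ['@', '@'] = false := by
        simpa using h1
      cases h2 : PySem.Str.startswith ln "+" with
      | true =>
        have h2' : PySem.Chars.startswith ln.toList ['+'] = true := by simpa using h2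
        have hm : PySem.Str.startswith ln "-" = false := by
          simpa using pvExcl (by decide) h2'
        have hs : PySem.Str.startswith ln " " = false := by
          simpa using pvExcl (by decide) h2'
        have := ih (ln :: c)
        simp only [List.any_cons, List.filter_cons, h2, hm, hs] at this
        simp only [pvLoopA, pvGroupB, h1, h2, Bool.false_eq_true, if_false, Bool.not_true, if_true]
        simpa using this
      | false =>
        cases h3 : PySem.Str.startswith ln "-" with
        | true =>
          have h3' : PySem.Chars.startswith ln.toList ['-'] = true := by simpa using h3
          have hs : PySem.Str.startswith ln " " = false := by
            simpa using pvExcl (by decide) h3'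
          have := ih (ln :: c)
          simp only [List.any_cons, List.filter_cons, h2, h3, hs] at this
          simp only [pvLoopA, pvGroupB, h1, h2, h3, Bool.false_eq_true, if_false,
            Bool.not_true, if_true]
          simpa using this
        | false =>
          cases h4 : PySem.Str.startswith ln " " with
          | true =>
            have := ih (ln :: c)
            simp only [List.any_cons, List.filter_cons, h2, h3, h4] at this
            simp only [pvLoopA, pvGroupB, h1, h2, h3, h4, Bool.false_eq_true, if_false,
              Bool.not_true, if_true]
            rw [show (((c.filter (fun l => PySem.Str.startswith l " ")).length : Int) + 1)
                = (((c.filter (fun l => PySem.Str.startswith l " ")).length + 1 : Nat) : Int) by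
              push_cast; ring]
            simpa using this
          | false =>
            have := ih (ln :: c)
            simp only [List.any_cons, List.filter_cons, h2, h3, h4] at this
            simp only [pvLoopA, pvGroupB, h1, h2, h3, h4, Bool.false_eq_true, if_false,
              Bool.not_true]
            simpa using this

-- phase before the first '@@': A skips lines, B's grouping has produced nothing yet
theorem pvLoopA_preHunk (lines : List String) :
    pvLoopA lines false false false 0 false =
      (if (pvGroupB lines none).isEmpty then (false, "No @@ hunks found.")
       else pvValidateB (pvGroupB lines none)) := by
  induction lines with
  | nil => simp [pvLoopA, pvGroupB, pvFlushA]
  | cons ln rest ih =>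
    cases h1 : PySem.Str.startswith ln "@@" with
    | true =>
      have h0 := pvLoopA_inHunk rest []
      simp only [List.any_nil, List.filter_nil, List.length_nil, Nat.cast_zero] at h0
      simp only [pvLoopA, pvGroupB, h1, if_true, pvFlushA]
      simp [h0, List.isEmpty_iff, pvGroupB_some_ne_nil]
    | false =>
      simp only [pvLoopA, pvGroupB, h1, Bool.false_eq_true, if_false, Bool.not_false, if_true]
      exact ih

-- ===== VERDICT (by name: the statement is the Claim_ definition above) =====
theorem require_add_and_remove_each_hunk_py_spec : Claim_equal_require_add_and_remove_each_hunk_py := by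
  intro diff_text _
  unfold Spec_require_add_and_remove_each_hunk_py
  unfold require_add_and_remove_each_hunk_py require_add_and_remove_each_hunk_py_alt
  simp only [pvLoopA_preHunk]
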